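-- pv_equiv track=rewrite | github.com/hgupta94/cool_league_site | scripts/testing/clinching_scenarios.py | get_scenarios
-- ===== SOURCE A (Python) =====
-- from itertools import product, combinations
--
-- def get_scenarios(team_names, matchups):
--     """Calculate all possible combinations of matchup and tophalf wins"""
--     h2h_outcomes = list(product([0, 1], repeat=len(matchups)))
--     median_outcomes = list(combinations(team_names, len(team_names) // 2))
--     all_scenarios = []
--
--     for h2h in h2h_outcomes:
--         for med_winners in median_outcomes:
--             week_winners = {
--                 'matchup': {name: 0 for name in team_names},
--                 'tophalf': {name: 0 for name in team_names},
--             }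
--
--             # H2H results
--             for i, (hm, aw) in enumerate(matchups):
--                 if h2h[i] == 0:
--                     week_winners['matchup'][hm] += 1
--                 else:
--                     week_winners['matchup'][aw] += 1
--
--             # Median results — exactly half the teams get +1
--             for name in med_winners:
--                 week_winners['tophalf'][name] += 1
--
--             all_scenarios.append(week_winners)
--     return all_scenarios
-- ===== SOURCE B (Python) =====
-- def get_scenarios(team_names, matchups):
--     """Build the scenario dicts by structural recursion instead of enumerating
--     bit tuples / combination tuples: the matchup dicts are grown by doubling
--     (home-win / away-win branch per matchup) and the tophalf dicts by a
--     choose-k recursion, then paired."""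
--     base = {name: 0 for name in team_names}
--
--     def bump(d, name):
--         d2 = dict(d)
--         d2[name] += 1
--         return d2
--
--     matchup_dicts = [base]
--     for hm, aw in matchups:
--         matchup_dicts = [bump(d, w) for d in matchup_dicts for w in (hm, aw)]
--
--     def choose(names, k, acc):
--         if k == 0:
--             return [acc]
--         if len(names) < k:
--             return []
--         return choose(names[1:], k - 1, bump(acc, names[0])) + choose(names[1:], k, acc)
--
--     tophalf_dicts = choose(list(team_names), len(team_names) // 2, base)
--
--     return [{'matchup': dict(m), 'tophalf': dict(t)}
--             for m in matchup_dicts for t in tophalf_dicts]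
-- ===== Notes on version B (the rewrite author's own statement) =====
-- stated objective: alternative
-- what changed: B drops the itertools enumeration entirely: instead of materialising bit tuples and combination tuples and rebuilding count dicts per scenario pair, it grows the matchup dicts by repeated doubling (one home-win/away-win branch per matchup) and the tophalf dicts by a recursive choose-k over the team list, then pairs the two dict lists.
import Mathlib
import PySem

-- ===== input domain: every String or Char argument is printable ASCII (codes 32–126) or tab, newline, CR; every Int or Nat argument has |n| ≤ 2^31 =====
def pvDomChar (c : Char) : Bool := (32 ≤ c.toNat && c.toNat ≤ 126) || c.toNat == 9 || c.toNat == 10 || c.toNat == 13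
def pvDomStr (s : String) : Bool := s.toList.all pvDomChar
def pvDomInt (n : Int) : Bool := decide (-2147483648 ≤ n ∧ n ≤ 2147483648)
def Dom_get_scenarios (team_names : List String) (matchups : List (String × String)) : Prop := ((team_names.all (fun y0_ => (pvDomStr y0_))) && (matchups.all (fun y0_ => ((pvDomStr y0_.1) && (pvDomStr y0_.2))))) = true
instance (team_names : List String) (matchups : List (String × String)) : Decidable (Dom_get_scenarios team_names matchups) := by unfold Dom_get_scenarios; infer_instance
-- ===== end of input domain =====

-- B builds the scenario dicts by structural recursion (doubling per matchup, choose-k per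
-- team) instead of enumerating bit tuples and combination tuples (objective: alternative).

-- itertools.product([0, 1], repeat=n), in CPython's order (leftmost varies slowest); A only
def prodBits : Nat → List (List Int)
  | 0 => [[]]
  | n + 1 => (prodBits n).map (fun t => 0 :: t) ++ (prodBits n).map (fun t => 1 :: t)

-- {name: 0 for name in team_names}; shared by both ports
def zeroDict (team_names : List String) : PySem.Dict String Int :=
  team_names.foldl (fun d n => d.insert n 0) PySem.Dict.empty

-- ===== PORT A =====
def get_scenarios (team_names : List String) (matchups : List (String × String)) : List (List (String × List (String × Int))) :=
  let h2h_outcomes := prodBits matchups.length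
  let median_outcomes := PySem.List.combinations team_names (team_names.length / 2)
  h2h_outcomes.foldl (fun all_scenarios h2h =>
    median_outcomes.foldl (fun all_scenarios med_winners =>
      -- week_winners = {'matchup': …, 'tophalf': …}: the two inner dicts, mutated in place
      let wwMatchup := zeroDict team_names
      let wwTophalf := zeroDict team_names
      -- for i, (hm, aw) in enumerate(matchups): h2h[i] is always in range, so pyGetD with
      -- a dummy default is exact here
      let wwMatchup := (PySem.List.enumerate matchups 0).foldl (fun d p =>
        if PySem.List.pyGetD h2h p.1 0 == 0 then d.modify p.2.1 0 (· + 1)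
        else d.modify p.2.2 0 (· + 1)) wwMatchup
      let wwTophalf := med_winners.foldl (fun d name => d.modify name 0 (· + 1)) wwTophalf
      all_scenarios ++ [[("matchup", wwMatchup.items), ("tophalf", wwTophalf.items)]]) all_scenarios) []

-- ===== PORT B =====
-- bump(d, name): copy of d with d[name] += 1 (PySem.Dict is functional, so the copy is implicit)
def bumpD (d : PySem.Dict String Int) (name : String) : PySem.Dict String Int :=
  d.modify name 0 (· + 1)

-- choose(names, k, acc): every way of bumping exactly k of the names, index-lexicographic
def chooseD : List String → Nat → PySem.Dict String Int → List (PySem.Dict String Int)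
  | _, 0, acc => [acc]
  | names, k + 1, acc =>
    if names.length < k + 1 then []
    else match names with
      | [] => []
      | n :: rest => chooseD rest k (bumpD acc n) ++ chooseD rest (k + 1) acc

def get_scenarios_alt (team_names : List String) (matchups : List (String × String)) : List (List (String × List (String × Int))) :=
  let base := zeroDict team_names
  let matchup_dicts := matchups.foldl (fun acc p =>
    acc.flatMap (fun d => [bumpD d p.1, bumpD d p.2])) [base]
  let tophalf_dicts := chooseD team_names (team_names.length / 2) base
  matchup_dicts.flatMap (fun m => tophalf_dicts.map (fun t =>
    [("matchup", m.items), ("tophalf", t.items)]))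

-- ===== PRECONDITION & SPEC =====
-- Pre_ excludes matchups mentioning a team not in team_names: there the Python A (and B)
-- raises KeyError on the '+= 1' dict update.
def Pre_get_scenarios (team_names : List String) (matchups : List (String × String)) : Prop :=
  ∀ p ∈ matchups, p.1 ∈ team_names ∧ p.2 ∈ team_names
instance (team_names : List String) (matchups : List (String × String)) : Decidable (Pre_get_scenarios team_names matchups) := by unfold Pre_get_scenarios; infer_instance
def pvWitness_get_scenarios : List String × (List (String × String)) :=
  (["a", "b", "c", "d"], [("a", "b"), ("c", "d")])
def Spec_get_scenarios (team_names : List String) (matchups : List (String × String)) (out : List (List (String × List (String × Int)))) : Prop := out = get_scenarios_alt team_names matchups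
instance (team_names : List String) (matchups : List (String × String)) (out : List (List (String × List (String × Int)))) : Decidable (Spec_get_scenarios team_names matchups out) := by unfold Spec_get_scenarios; infer_instance

-- ===== CLAIM (what is proved, stated in full; the proofs are below) =====
def Claim_equal_get_scenarios : Prop := ∀ (team_names : List String) (matchups : List (String × String)), Dom_get_scenarios team_names matchups → Pre_get_scenarios team_names matchups → Spec_get_scenarios team_names matchups (get_scenarios team_names matchups)

-- ===== LEMMAS AND PROOFS =====

theorem length_of_mem_prodBits {n : Nat} {t : List Int} (h : t ∈ prodBits n) : t.length = n := by
  induction n generalizing t with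
  | zero => simp [prodBits] at h; simp [h]
  | succ n ih =>
    simp only [prodBits, List.mem_append, List.mem_map] at h
    rcases h with ⟨u, hu, rfl⟩ | ⟨u, hu, rfl⟩ <;> simp [ih hu]

-- A's enumerate-and-index loop equals a zip fold, for an aligned bit list
theorem enum_fold_eq_zip_fold (ms : List (String × String)) (u v : List Int)
    (hlen : v.length = ms.length) (d : PySem.Dict String Int) :
    (PySem.List.enumerate ms (u.length : Int)).foldl (fun d p =>
        if PySem.List.pyGetD (u ++ v) p.1 0 == 0 then d.modify p.2.1 0 (· + 1)
        else d.modify p.2.2 0 (· + 1)) d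
      = (ms.zip v).foldl (fun d p =>
        d.modify (if p.2 == 0 then p.1.1 else p.1.2) 0 (· + 1)) d := by
  induction ms generalizing u v d with
  | nil => cases v <;> simp_all [PySem.List.enumerate_nil]
  | cons x ms ih =>
    cases v with
    | nil => simp at hlen
    | cons b v =>
      rw [PySem.List.enumerate_cons]
      simp only [List.zip_cons_cons, List.foldl_cons]
      have hget : PySem.List.pyGetD (u ++ b :: v) (u.length : Int) 0 = b := by
        rw [PySem.List.pyGetD_natCast]
        simp [List.getD_eq_getElem?_getD]
      rw [hget]
      have harg : ((u.length : Int) + 1) = ((u ++ [b]).length : Int) := by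
        simp
      have hlist : u ++ b :: v = (u ++ [b]) ++ v := by simp
      rw [harg, hlist, ih (u ++ [b]) v (by simpa using hlen)]
      by_cases hb : b = 0 <;> simp [hb]

-- B's doubling fold equals mapping the zip fold over the bit-tuple enumeration
theorem doubling_eq_prodBits_map (ms : List (String × String))
    (acc : List (PySem.Dict String Int)) :
    ms.foldl (fun acc p => acc.flatMap (fun d => [bumpD d p.1, bumpD d p.2])) acc
      = acc.flatMap (fun d => (prodBits ms.length).map (fun bits =>
          (ms.zip bits).foldl (fun d p =>
            d.modify (if p.2 == 0 then p.1.1 else p.1.2) 0 (· + 1)) d)) := by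
  induction ms generalizing acc with
  | nil => simp [prodBits]
  | cons p ms ih =>
    simp only [List.foldl_cons, ih, List.flatMap_assoc]
    apply List.flatMap_congr
    intro d _
    simp [prodBits, List.map_append, List.map_map, Function.comp_def, bumpD,
      List.zip_cons_cons, List.foldl_cons]

-- B's choose-k recursion equals mapping the bump fold over the combinations
theorem chooseD_eq_combinations_map (names : List String) (k : Nat)
    (acc : PySem.Dict String Int) :
    chooseD names k acc
      = (PySem.List.combinations names k).map (fun med =>
          med.foldl (fun d name => d.modify name 0 (· + 1)) acc) := by
  induction names generalizing k acc with
  | nil =>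
    cases k with
    | zero => simp [chooseD, PySem.List.combinations_zero]
    | succ k => simp [chooseD, PySem.List.combinations_nil_succ]
  | cons n rest ih =>
    cases k with
    | zero => simp [chooseD, PySem.List.combinations_zero]
    | succ k =>
      rw [chooseD]
      split
      · next h =>
        have : (n :: rest).length < k + 1 := h
        rw [PySem.List.combinations_eq_nil_of_length_lt _ this]
        simp
      · rw [PySem.List.combinations_cons_succ]
        simp [ih, List.map_map, Function.comp, bumpD]

-- ===== VERDICT (by name: the statement is the Claim_ definition above) =====
theorem get_scenarios_spec : Claim_equal_get_scenarios := by
  intro team_names matchups _ _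
  show get_scenarios team_names matchups = get_scenarios_alt team_names matchups
  unfold get_scenarios get_scenarios_alt
  simp only [PySem.List.foldl_append_singleton_eq_map, PySem.List.foldl_append_eq_flatMap,
    List.nil_append]
  rw [doubling_eq_prodBits_map, chooseD_eq_combinations_map]
  simp only [List.flatMap_cons, List.flatMap_nil, List.append_nil, List.flatMap_map,
    List.map_map, Function.comp_def]
  apply List.flatMap_congr
  intro h2h hh
  have hlen : h2h.length = matchups.length := length_of_mem_prodBits hh
  have hm : (PySem.List.enumerate matchups 0).foldl (fun d p =>
        if PySem.List.pyGetD h2h p.1 0 == 0 then d.modify p.2.1 0 (· + 1)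
        else d.modify p.2.2 0 (· + 1)) (zeroDict team_names)
      = (matchups.zip h2h).foldl (fun d p =>
        d.modify (if p.2 == 0 then p.1.1 else p.1.2) 0 (· + 1)) (zeroDict team_names) :=
    enum_fold_eq_zip_fold matchups [] h2h hlen (zeroDict team_names)
  rw [hm]
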